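-- pv_equiv track=rewrite | github.com/AkusChhabra/CPS109 | allproblemx.py | duplicate_digit_bonus
-- ===== SOURCE A (Python) =====
-- def duplicate_digit_bonus(n):
--   li = str(n)
--   count, initial, total, calc = 1, li[0], 0, 0
--
--   for i in range(1,len(li)):
--     if initial == li[i]:
--       count += 1
--       if i+1 == len(li):
--           total += 2*10**(count-2)
--     else:
--       if count >= 2:
--           total += 10**(count-2)
--       count = 1
--
--     initial = li[i]
--
--   return total
-- ===== SOURCE B (Python) =====
-- def duplicate_digit_bonus(n):
--     # Two-phase: build the run-length table of str(n) first, then score it.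
--     def runs(c, k, rest):
--         if not rest:
--             return [k]
--         if rest[0] == c:
--             return runs(c, k + 1, rest[1:])
--         return [k] + runs(rest[0], 1, rest[1:])
--     s = str(n)
--     rs = runs(s[0], 1, s[1:])
--     total = sum(10 ** (L - 2) for L in rs[:-1] if L >= 2)
--     if rs[-1] >= 2:
--         total += 2 * 10 ** (rs[-1] - 2)
--     return total
-- ===== Notes on version B (the rewrite author's own statement) =====
-- stated objective: alternative
-- what changed: B first builds the run-length table of str(n) (a recursive groupby), then scores it in a separate pass (a power-of-ten bonus per interior run of length at least two, doubled for the final run), replacing A's single-pass accumulator with its in-loop last-index test.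
import Mathlib
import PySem

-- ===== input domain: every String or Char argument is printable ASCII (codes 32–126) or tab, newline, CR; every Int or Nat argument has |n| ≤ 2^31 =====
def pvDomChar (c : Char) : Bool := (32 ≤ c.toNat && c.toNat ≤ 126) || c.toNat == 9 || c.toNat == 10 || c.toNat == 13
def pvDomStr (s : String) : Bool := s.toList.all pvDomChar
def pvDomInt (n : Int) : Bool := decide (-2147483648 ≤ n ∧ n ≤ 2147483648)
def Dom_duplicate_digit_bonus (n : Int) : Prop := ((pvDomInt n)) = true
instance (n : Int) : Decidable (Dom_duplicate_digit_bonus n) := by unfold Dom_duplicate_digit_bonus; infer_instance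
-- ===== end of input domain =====

-- B replaces A's single-pass accumulator (with its in-loop last-index test) by a two-phase
-- run-length-table computation; objective: alternative (same cost), proved equal on all inputs.

-- ===== PORT A =====
-- A's for-loop over range(1, len(li)): structural recursion over the remaining suffix;
-- the Python test `i+1 == len(li)` is exactly `rest = []` for the suffix after li[i].
def loopA (count : Int) (initial : Char) (total : Int) : List Char → Int
  | [] => total
  | c :: rest =>
    if initial == c then
      let count := count + 1
      let total := if rest.isEmpty then total + 2 * 10 ^ (count - 2).toNat else total
      loopA count c total rest
    else
      let total := if 2 ≤ count then total + 10 ^ (count - 2).toNat else total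
      loopA 1 c total rest

def duplicate_digit_bonus (n : Int) : Int :=
  match (PySem.Int.toStr n).toList with
  | [] => 0            -- unreachable: str(n) is never empty (li[0] would raise)
  | c :: rest => loopA 1 c 0 rest

-- ===== PORT B =====
-- Source B's recursive run-length builder `runs`.
def runsAux (c : Char) (k : Int) : List Char → List Int
  | [] => [k]
  | d :: rest => if c == d then runsAux c (k + 1) rest else k :: runsAux d 1 rest

def duplicate_digit_bonus_alt (n : Int) : Int :=
  match (PySem.Int.toStr n).toList with
  | [] => 0            -- unreachable: str(n) is never empty (s[0] would raise)
  | c :: rest =>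
    let rs := runsAux c 1 rest
    let interior := rs.dropLast.foldl (fun t L => if 2 ≤ L then t + 10 ^ (L - 2).toNat else t) 0
    match rs.getLast? with
    | some L => if 2 ≤ L then interior + 2 * 10 ^ (L - 2).toNat else interior
    | none => interior

-- ===== PRECONDITION & SPEC =====
def Spec_duplicate_digit_bonus (n : Int) (out : Int) : Prop := out = duplicate_digit_bonus_alt n
instance (n : Int) (out : Int) : Decidable (Spec_duplicate_digit_bonus n out) := by unfold Spec_duplicate_digit_bonus; infer_instance

-- ===== CLAIM (what is proved, stated in full; the proofs are below) =====
def Claim_equal_duplicate_digit_bonus : Prop := ∀ (n : Int), Dom_duplicate_digit_bonus n → Spec_duplicate_digit_bonus n (duplicate_digit_bonus n)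

-- ===== LEMMAS AND PROOFS =====

-- B's scoring of a run-length table, as one function (for the invariant).
def scoreRuns (rs : List Int) : Int :=
  let interior := rs.dropLast.foldl (fun t L => if 2 ≤ L then t + 10 ^ (L - 2).toNat else t) 0
  match rs.getLast? with
  | some L => if 2 ≤ L then interior + 2 * 10 ^ (L - 2).toNat else interior
  | none => interior

def ib (k : Int) : Int := if 2 ≤ k then 10 ^ (k - 2).toNat else 0
def lb (k : Int) : Int := if 2 ≤ k then 2 * 10 ^ (k - 2).toNat else 0

lemma foldl_ib_add (l : List Int) (a : Int) :
    l.foldl (fun t L => if 2 ≤ L then t + 10 ^ (L - 2).toNat else t) a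
      = a + l.foldl (fun t L => if 2 ≤ L then t + 10 ^ (L - 2).toNat else t) 0 := by
  induction l generalizing a with
  | nil => simp
  | cons x l ih =>
    simp only [List.foldl_cons]
    rw [ih, ih (if 2 ≤ x then 0 + 10 ^ (x - 2).toNat else 0)]
    split_ifs <;> ring

lemma runsAux_ne_nil (c : Char) (k : Int) (l : List Char) : runsAux c k l ≠ [] := by
  cases l with
  | nil => simp [runsAux]
  | cons d rest =>
    simp only [runsAux]
    split_ifs <;> simp
    exact runsAux_ne_nil c (k + 1) rest

lemma getLast?_cons_ne_nil (k : Int) (rs : List Int) (h : rs ≠ []) :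
    (k :: rs).getLast? = rs.getLast? := by
  cases rs with
  | nil => exact absurd rfl h
  | cons x l => simp [List.getLast?_cons_cons]

lemma scoreRuns_cons (k : Int) (rs : List Int) (h : rs ≠ []) :
    scoreRuns (k :: rs) = ib k + scoreRuns rs := by
  simp only [scoreRuns, ib, List.dropLast_cons_of_ne_nil h, List.foldl_cons]
  rw [getLast?_cons_ne_nil k rs h, foldl_ib_add]
  cases hg : rs.getLast? with
  | none => rw [List.getLast?_eq_none_iff] at hg; exact absurd hg h
  | some L => by_cases hL : (2:Int) ≤ L <;> simp only [hL, if_true, if_false] <;> split_ifs <;> try ring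

lemma scoreRuns_single (k : Int) : scoreRuns [k] = lb k := by
  simp [scoreRuns, lb]

lemma loopA_eq_score (rest : List Char) : ∀ (c : Char) (k t : Int), 1 ≤ k →
    loopA k c t rest = t + scoreRuns (runsAux c k rest) - (if rest = [] then lb k else 0) := by
  induction rest with
  | nil =>
    intro c k t _
    simp [loopA, runsAux, scoreRuns_single]
  | cons d rest ih =>
    intro c k t hk
    by_cases hcd : c == d
    · have hcd' : c = d := by exact eq_of_beq hcd
      simp only [loopA, runsAux, hcd, if_true]
      subst hcd'
      rw [ih c (k + 1) _ (by omega)]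
      have h2 : (2:Int) ≤ k + 1 := by omega
      cases hre : rest with
      | nil => simp [lb, h2]; ring
      | cons e l => simp
    · have hcd0 : (c == d) = false := by simpa using hcd
      simp only [loopA, runsAux, hcd0, Bool.false_eq_true, if_false]
      rw [ih d 1 _ (by omega),
        scoreRuns_cons k _ (runsAux_ne_nil d 1 rest)]
      have hz : (if rest = [] then lb 1 else 0) = (0 : Int) := by split_ifs <;> simp [lb]
      rw [hz, if_neg (show ¬(d :: rest = []) by simp)]
      unfold ib
      split_ifs <;> ring

-- ===== VERDICT (by name: the statement is the Claim_ definition above) =====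
theorem duplicate_digit_bonus_spec : Claim_equal_duplicate_digit_bonus := by
  intro n _
  unfold Spec_duplicate_digit_bonus duplicate_digit_bonus duplicate_digit_bonus_alt
  cases h : (PySem.Int.toStr n).toList with
  | nil => rfl
  | cons c rest =>
    dsimp only
    rw [loopA_eq_score rest c 1 0 (by omega)]
    have hlb : lb 1 = 0 := by simp [lb]
    cases rest <;> simp [scoreRuns, hlb]
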